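-- pv_equiv track=rewrite | github.com/GANI-7177/python_code | py/monkey_banana.py | monkey_banana
-- ===== SOURCE A (Python) =====
-- def monkey_banana(state):
--     def next_states(s):
--         actions = {
--             'move_to_box': ('at_box', s[1], s[2]),
--             'climb_box': (s[0], 'on_box', s[2]),
--             'grab_banana': (s[0], s[1], 'has_banana') if s[0] == 'at_box' and s[1] == 'on_box' else s
--         }
--         return [(a, actions[a]) for a in actions if s != actions[a]]
--
--     if state == ('at_box', 'on_box', 'has_banana'):
--         return ["Banana grabbed!"]
--
--     for action, new_state in next_states(state):
--         result = monkey_banana(new_state)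
--         if result:
--             return [action] + result
-- ===== SOURCE B (Python) =====
-- def monkey_banana(state):
--     # Closed form: the three independent conditions determine the plan directly.
--     s0, s1, s2 = state
--     path = []
--     if s0 != 'at_box':
--         path.append('move_to_box')
--     if s1 != 'on_box':
--         path.append('climb_box')
--     if s2 != 'has_banana':
--         path.append('grab_banana')
--     path.append('Banana grabbed!')
--     return path
-- ===== Notes on version B (the rewrite author's own statement) =====
-- stated objective: simpler
-- what changed: Replaces the recursive DFS over generated successor states with a non-recursive closed form that appends each of the three actions exactly when its state component is not yet satisfied.
import Mathlib
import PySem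

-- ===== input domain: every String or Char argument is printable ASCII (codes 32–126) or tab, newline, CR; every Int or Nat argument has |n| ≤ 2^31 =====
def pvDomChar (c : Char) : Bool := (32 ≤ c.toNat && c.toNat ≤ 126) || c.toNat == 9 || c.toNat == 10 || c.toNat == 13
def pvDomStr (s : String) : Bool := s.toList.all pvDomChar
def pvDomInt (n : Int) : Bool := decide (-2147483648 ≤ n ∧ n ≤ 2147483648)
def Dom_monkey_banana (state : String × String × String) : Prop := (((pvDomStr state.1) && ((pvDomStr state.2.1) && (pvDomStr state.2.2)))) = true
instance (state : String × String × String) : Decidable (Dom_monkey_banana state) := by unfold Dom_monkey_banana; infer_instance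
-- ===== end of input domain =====

-- B replaces A's recursive DFS over generated successor states with a non-recursive closed
-- form (objective: simpler); both always return some path, so no Pre_ is needed.

-- ===== PORT A =====
-- A's recursion always terminates because every successor kept by next_states fixes one more
-- of the three state components; mbMeasure counts the unfixed components and mbNext_lt is the
-- termination argument the port cites.
def mbMeasure (s : String × String × String) : Nat :=
  (if s.1 = "at_box" then 0 else 1) + (if s.2.1 = "on_box" then 0 else 1) +
  (if s.2.2 = "has_banana" then 0 else 1)

-- Python's `actions` dict has three distinct literal keys, so it is ported as its
-- insertion-order items list; the comprehension `[(a, actions[a]) for a in actions if s != actions[a]]`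
-- iterates the keys in that order and becomes a filter over the items (exact).
def mbNext (s : String × String × String) : List (String × (String × String × String)) :=
  (([("move_to_box", ("at_box", s.2.1, s.2.2)),
     ("climb_box", (s.1, "on_box", s.2.2)),
     ("grab_banana", if s.1 = "at_box" ∧ s.2.1 = "on_box" then (s.1, s.2.1, "has_banana") else s)]
    : List (String × (String × String × String))).filter (fun p => s ≠ p.2))

theorem mbNext_lt (s : String × String × String) (p : String × (String × String × String))
    (hm : p ∈ mbNext s) : mbMeasure p.2 < mbMeasure s := by
  obtain ⟨a, b, c⟩ := s
  simp only [mbNext, List.mem_filter, List.mem_cons, List.not_mem_nil, or_false,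
    decide_eq_true_eq] at hm
  obtain ⟨h1 | h1 | h1, h2⟩ := hm <;> subst h1 <;> simp_all [mbMeasure, Prod.ext_iff]

-- The `for action, new_state in …: result = monkey_banana(new_state); if result: return
-- [action] + result` loop (with implicit `return None` at the end) is findSome? over the
-- successor list; `if result:` is Python truthiness (None or empty list falls through).
def monkey_banana (state : String × String × String) : Option (List String) :=
  if state = ("at_box", "on_box", "has_banana") then some ["Banana grabbed!"]
  else
    (mbNext state).attach.findSome? (fun p =>
      match monkey_banana p.1.2 with
      | some r => if r.isEmpty then none else some (p.1.1 :: r)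
      | none => none)
termination_by mbMeasure state
decreasing_by exact mbNext_lt state p.1 p.2

-- ===== PORT B =====
def monkey_banana_alt (state : String × String × String) : Option (List String) :=
  let path : List String := []
  let path := if state.1 ≠ "at_box" then path ++ ["move_to_box"] else path
  let path := if state.2.1 ≠ "on_box" then path ++ ["climb_box"] else path
  let path := if state.2.2 ≠ "has_banana" then path ++ ["grab_banana"] else path
  some (path ++ ["Banana grabbed!"])

-- ===== PRECONDITION & SPEC =====
def Spec_monkey_banana (state : String × String × String) (out : Option (List String)) : Prop := out = monkey_banana_alt state
instance (state : String × String × String) (out : Option (List String)) : Decidable (Spec_monkey_banana state out) := by unfold Spec_monkey_banana; infer_instance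

-- ===== CLAIM (what is proved, stated in full; the proofs are below) =====
def Claim_equal_monkey_banana : Prop := ∀ (state : String × String × String), Dom_monkey_banana state → Spec_monkey_banana state (monkey_banana state)

-- ===== LEMMAS AND PROOFS =====
lemma mb_goal : monkey_banana ("at_box", "on_box", "has_banana") = some ["Banana grabbed!"] := by
  rw [monkey_banana]; simp

lemma mb_grab (c : String) (hc : c ≠ "has_banana") :
    monkey_banana ("at_box", "on_box", c) = some ["grab_banana", "Banana grabbed!"] := by
  rw [monkey_banana]
  simp [mbNext, hc, Prod.ext_iff, List.attach, List.attachWith, mb_goal]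

lemma mb_climb (b c : String) (hb : b ≠ "on_box") :
    monkey_banana ("at_box", b, c) =
      some ("climb_box" ::
        (if c = "has_banana" then ["Banana grabbed!"] else ["grab_banana", "Banana grabbed!"])) := by
  rw [monkey_banana]
  by_cases hc : c = "has_banana" <;>
    simp [mbNext, hb, hc, Prod.ext_iff, List.attach, List.attachWith, mb_goal, mb_grab]

lemma mb_move (a b c : String) (ha : a ≠ "at_box") :
    monkey_banana (a, b, c) =
      some ("move_to_box" ::
        ((if b = "on_box" then [] else ["climb_box"]) ++
         (if c = "has_banana" then [] else ["grab_banana"]) ++ ["Banana grabbed!"])) := by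
  rw [monkey_banana]
  by_cases hb : b = "on_box" <;> by_cases hc : c = "has_banana" <;>
    simp [mbNext, ha, hb, hc, Prod.ext_iff, List.attach, List.attachWith, mb_goal, mb_grab, mb_climb]

-- ===== VERDICT (by name: the statement is the Claim_ definition above) =====
theorem monkey_banana_spec : Claim_equal_monkey_banana := by
  intro state _
  obtain ⟨a, b, c⟩ := state
  unfold Spec_monkey_banana
  by_cases ha : a = "at_box"
  · subst ha
    by_cases hb : b = "on_box"
    · subst hb
      by_cases hc : c = "has_banana"
      · subst hc; rw [mb_goal]; simp [monkey_banana_alt]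
      · rw [mb_grab c hc]; simp [monkey_banana_alt, hc]
    · rw [mb_climb b c hb]
      by_cases hc : c = "has_banana" <;> simp [monkey_banana_alt, hb, hc]
  · rw [mb_move a b c ha]
    by_cases hb : b = "on_box" <;> by_cases hc : c = "has_banana" <;>
      simp [monkey_banana_alt, ha, hb, hc]
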